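-- pv_equiv track=rewrite | github.com/paiml/depyler | examples/hard_matrix_spiral.py | spiral_layer_sum
-- ===== SOURCE A (Python) =====
-- def spiral_layer_sum(mat: list[int], n: int, layer: int) -> int:
--     """Sum elements on a given spiral layer (0 = outermost)."""
--     total: int = 0
--     top: int = layer
--     bottom: int = n - 1 - layer
--     left: int = layer
--     right: int = n - 1 - layer
--
--     if top > bottom or left > right:
--         return 0
--
--     col: int = left
--     while col <= right:
--         total = total + mat[top * n + col]
--         col = col + 1
--
--     row: int = top + 1
--     while row <= bottom:
--         total = total + mat[row * n + right]
--         row = row + 1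
--
--     if top < bottom:
--         col2: int = right - 1
--         while col2 >= left:
--             total = total + mat[bottom * n + col2]
--             col2 = col2 - 1
--
--     if left < right:
--         row2: int = bottom - 1
--         while row2 > top:
--             total = total + mat[row2 * n + left]
--             row2 = row2 - 1
--
--     return total
-- ===== SOURCE B (Python) =====
-- def spiral_layer_sum(mat: list[int], n: int, layer: int) -> int:
--     """Sum elements on a given spiral layer (0 = outermost)."""
--     top = layer
--     bottom = n - 1 - layer
--     if top > bottom:
--         return 0
--     total = 0
--     for r in range(top, bottom + 1):
--         for c in range(top, bottom + 1):
--             if r == top or r == bottom or c == top or c == bottom: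
--                 total += mat[r * n + c]
--     return total
-- ===== Notes on version B (the rewrite author's own statement) =====
-- stated objective: simpler
-- what changed: Replaces A's four directional edge-walk loops (with corner-deduplication special cases) by a single nested scan of the layer's sub-block that adds a cell exactly when it lies on the ring border, collapsing all degenerate single-row/column cases into one predicate.
import Mathlib
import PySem

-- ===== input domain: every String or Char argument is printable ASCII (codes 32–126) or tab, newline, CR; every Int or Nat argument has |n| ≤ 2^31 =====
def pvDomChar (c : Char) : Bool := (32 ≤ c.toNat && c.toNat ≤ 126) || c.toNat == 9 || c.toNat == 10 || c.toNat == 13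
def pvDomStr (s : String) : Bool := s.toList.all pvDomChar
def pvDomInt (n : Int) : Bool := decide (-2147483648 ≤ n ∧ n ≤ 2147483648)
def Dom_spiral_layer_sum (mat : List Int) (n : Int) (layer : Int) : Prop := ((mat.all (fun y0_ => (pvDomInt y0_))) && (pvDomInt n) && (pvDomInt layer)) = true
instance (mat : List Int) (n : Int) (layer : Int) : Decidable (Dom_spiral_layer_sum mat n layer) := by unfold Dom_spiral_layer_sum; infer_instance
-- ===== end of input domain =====

-- B changes the traversal: one nested block scan with a border predicate instead of A's
-- four directional edge walks (objective: simpler). Equality of return values is proved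
-- unconditionally; Pre_ only excludes the inputs on which the Python raises IndexError.

-- ===== PORT A =====
-- literal transliteration: each while loop is a fold over the pyRange it enumerates
def spiral_layer_sum (mat : List Int) (n : Int) (layer : Int) : Int :=
  let top := layer
  let bottom := n - 1 - layer
  let left := layer
  let right := n - 1 - layer
  if top > bottom ∨ left > right then 0
  else
    let total := (PySem.List.pyRange left (right + 1) 1).foldl
      (fun acc col => acc + PySem.List.pyGetD mat (top * n + col) 0) 0
    let total := (PySem.List.pyRange (top + 1) (bottom + 1) 1).foldl
      (fun acc row => acc + PySem.List.pyGetD mat (row * n + right) 0) total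
    let total := if top < bottom then
      (PySem.List.pyRange (right - 1) (left - 1) (-1)).foldl
        (fun acc col2 => acc + PySem.List.pyGetD mat (bottom * n + col2) 0) total
      else total
    let total := if left < right then
      (PySem.List.pyRange (bottom - 1) top (-1)).foldl
        (fun acc row2 => acc + PySem.List.pyGetD mat (row2 * n + left) 0) total
      else total
    total

-- ===== PORT B =====
def spiral_layer_sum_alt (mat : List Int) (n : Int) (layer : Int) : Int :=
  let top := layer
  let bottom := n - 1 - layer
  if top > bottom then 0
  else
    (PySem.List.pyRange top (bottom + 1) 1).foldl (fun acc r =>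
      (PySem.List.pyRange top (bottom + 1) 1).foldl (fun acc2 c =>
        if r = top ∨ r = bottom ∨ c = top ∨ c = bottom then
          acc2 + PySem.List.pyGetD mat (r * n + c) 0
        else acc2) acc) 0

-- ===== PRECONDITION & SPEC =====
-- Pre_ excludes exactly the inputs on which the Python A raises IndexError (some touched
-- ring index outside [-len, len)); the min/max touched index is attained at a ring corner.
def Pre_spiral_layer_sum (mat : List Int) (n : Int) (layer : Int) : Prop :=
  let t := layer
  let b := n - 1 - layer
  let L : Int := (mat.length : Int)
  b < t ∨ (-L ≤ min (min (t * n + t) (t * n + b)) (min (b * n + t) (b * n + b)) ∧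
           max (max (t * n + t) (t * n + b)) (max (b * n + t) (b * n + b)) < L)
instance (mat : List Int) (n : Int) (layer : Int) : Decidable (Pre_spiral_layer_sum mat n layer) := by
  unfold Pre_spiral_layer_sum; infer_instance

def pvWitness_spiral_layer_sum : List Int × Int × Int := ([1, 2, 3, 4, 5, 6, 7, 8, 9], 3, 0)

def Spec_spiral_layer_sum (mat : List Int) (n : Int) (layer : Int) (out : Int) : Prop := out = spiral_layer_sum_alt mat n layer
instance (mat : List Int) (n : Int) (layer : Int) (out : Int) : Decidable (Spec_spiral_layer_sum mat n layer out) := by unfold Spec_spiral_layer_sum; infer_instance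

-- ===== CLAIM (what is proved, stated in full; the proofs are below) =====
def Claim_equal_spiral_layer_sum : Prop := ∀ (mat : List Int) (n : Int) (layer : Int), Dom_spiral_layer_sum mat n layer → Pre_spiral_layer_sum mat n layer → Spec_spiral_layer_sum mat n layer (spiral_layer_sum mat n layer)

-- ===== LEMMAS AND PROOFS =====

-- an accumulating loop with a guarded addition, as init + a list sum
theorem foldl_ite_add {α : Type} (l : List α) (p : α → Prop) [DecidablePred p]
    (g : α → Int) (a : Int) :
    l.foldl (fun acc x => if p x then acc + g x else acc) a
      = a + (l.map (fun x => if p x then g x else 0)).sum := by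
  have h : (fun acc x => if p x then acc + g x else acc)
      = fun (acc : Int) x => acc + (if p x then g x else 0) := by
    funext acc x; split_ifs <;> simp
  rw [h, PySem.List.foldl_add]

-- list-range sums as Finset.range sums
theorem sum_map_range (m : ℕ) (h : ℕ → Int) :
    ((List.range m).map h).sum = ∑ j ∈ Finset.range m, h j := by
  induction m with
  | zero => simp
  | succ m ih => rw [List.range_succ, Finset.sum_range_succ]; simp [ih]

-- a two-point indicator sum over a range
theorem sum_two_point (k : ℕ) (hk : 0 < k) (h : ℕ → Int) :
    (∑ c ∈ Finset.range (k + 1), if c = 0 ∨ c = k then h c else 0) = h 0 + h k := by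
  have hsplit : ∀ c, (if c = 0 ∨ c = k then h c else 0)
      = (if c = 0 then h c else 0) + (if c = k then h c else 0) := by
    intro c
    by_cases h0 : c = 0 <;> by_cases h1 : c = k <;> simp [h0, h1] <;> omega
  simp only [hsplit, Finset.sum_add_distrib]
  rw [Finset.sum_ite_eq' (Finset.range (k + 1)) 0 h,
      Finset.sum_ite_eq' (Finset.range (k + 1)) k h]
  simp [Finset.mem_range]

-- the core combinatorial fact: the block scan with a border predicate equals
-- top row + right column + bottom row + inner left column
theorem ring_sum (F : ℕ → ℕ → Int) (k : ℕ) :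
    (∑ r ∈ Finset.range (k + 1), ∑ c ∈ Finset.range (k + 1),
        if r = 0 ∨ r = k ∨ c = 0 ∨ c = k then F r c else 0)
    = (∑ c ∈ Finset.range (k + 1), F 0 c)
      + (∑ j ∈ Finset.range k, F (j + 1) k)
      + (if 0 < k then ∑ j ∈ Finset.range k, F k j else 0)
      + (if 0 < k then ∑ j ∈ Finset.range (k - 1), F (j + 1) 0 else 0) := by
  cases k with
  | zero => simp
  | succ m =>
    have hk : 0 < m + 1 := Nat.succ_pos m
    rw [Finset.sum_range_succ']
    rw [Finset.sum_range_succ (fun j => ∑ c ∈ Finset.range (m + 1 + 1),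
        if j + 1 = 0 ∨ j + 1 = m + 1 ∨ c = 0 ∨ c = m + 1 then F (j + 1) c else 0) m]
    have hmid : (∑ j ∈ Finset.range m, ∑ c ∈ Finset.range (m + 1 + 1),
        if j + 1 = 0 ∨ j + 1 = m + 1 ∨ c = 0 ∨ c = m + 1 then F (j + 1) c else 0)
        = ∑ j ∈ Finset.range m, (F (j + 1) 0 + F (j + 1) (m + 1)) := by
      refine Finset.sum_congr rfl (fun j hj => ?_)
      have hj' : j < m := Finset.mem_range.mp hj
      have hcond : ∀ c, (j + 1 = 0 ∨ j + 1 = m + 1 ∨ c = 0 ∨ c = m + 1) ↔ (c = 0 ∨ c = m + 1) := by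
        intro c; omega
      calc (∑ c ∈ Finset.range (m + 1 + 1),
            if j + 1 = 0 ∨ j + 1 = m + 1 ∨ c = 0 ∨ c = m + 1 then F (j + 1) c else 0)
          = ∑ c ∈ Finset.range (m + 1 + 1),
            if c = 0 ∨ c = m + 1 then F (j + 1) c else 0 := by
            refine Finset.sum_congr rfl (fun c _ => ?_)
            exact if_congr (hcond c) rfl rfl
        _ = F (j + 1) 0 + F (j + 1) (m + 1) := sum_two_point (m + 1) hk _
    rw [hmid]
    have hrow0 : (∑ c ∈ Finset.range (m + 1 + 1),
        if (0 : ℕ) = 0 ∨ (0 : ℕ) = m + 1 ∨ c = 0 ∨ c = m + 1 then F 0 c else 0)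
        = ∑ c ∈ Finset.range (m + 1 + 1), F 0 c := by
      refine Finset.sum_congr rfl (fun c _ => ?_); simp
    have hrowk : (∑ c ∈ Finset.range (m + 1 + 1),
        if m + 1 = 0 ∨ m + 1 = m + 1 ∨ c = 0 ∨ c = m + 1 then F (m + 1) c else 0)
        = (∑ j ∈ Finset.range (m + 1), F (m + 1) j) + F (m + 1) (m + 1) := by
      rw [show (∑ c ∈ Finset.range (m + 1 + 1),
          if m + 1 = 0 ∨ m + 1 = m + 1 ∨ c = 0 ∨ c = m + 1 then F (m + 1) c else 0)
          = ∑ c ∈ Finset.range (m + 1 + 1), F (m + 1) c from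
        Finset.sum_congr rfl (fun c _ => by simp)]
      exact Finset.sum_range_succ _ _
    rw [hrow0, hrowk]
    rw [Finset.sum_add_distrib]
    rw [if_pos hk, if_pos hk]
    rw [Finset.sum_range_succ (fun j => F (j + 1) (m + 1)) m]
    simp only [Nat.add_sub_cancel]
    ring

-- the central equality, unconditional: both ports add up the same ring cells
theorem main_eq (mat : List Int) (n : Int) (layer : Int) :
    spiral_layer_sum mat n layer = spiral_layer_sum_alt mat n layer := by
  by_cases hbt : n - 1 - layer < layer
  · -- empty layer: both return 0
    simp [spiral_layer_sum, spiral_layer_sum_alt, hbt]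
  · push Not at hbt
    obtain ⟨k, hk⟩ : ∃ k : ℕ, n - 1 - layer = layer + (k : Int) :=
      ⟨(n - 1 - layer - layer).toNat, by omega⟩
    simp only [spiral_layer_sum, spiral_layer_sum_alt, hk]
    rw [if_neg (by omega : ¬(layer > layer + (k : Int) ∨ layer > layer + (k : Int))),
        if_neg (by omega : ¬ layer > layer + (k : Int))]
    -- B side: turn the guarded inner loop into init + a list sum
    have hBinner : (fun (acc : Int) (r : Int) =>
        (PySem.List.pyRange layer (layer + (k : Int) + 1) 1).foldl (fun acc2 c =>
          if r = layer ∨ r = layer + (k : Int) ∨ c = layer ∨ c = layer + (k : Int) then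
            acc2 + PySem.List.pyGetD mat (r * n + c) 0
          else acc2) acc)
        = fun (acc : Int) (r : Int) => acc +
          ((PySem.List.pyRange layer (layer + (k : Int) + 1) 1).map (fun c =>
            if r = layer ∨ r = layer + (k : Int) ∨ c = layer ∨ c = layer + (k : Int) then
              PySem.List.pyGetD mat (r * n + c) 0 else 0)).sum := by
      funext acc r
      exact foldl_ite_add _ _ _ _
    rw [hBinner]
    -- all loops to sums; countdown ranges reversed; everything over Finset.range
    simp only [PySem.List.foldl_add, PySem.List.pyRange_neg_one_eq_reverse,
      List.map_reverse, List.sum_reverse]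
    rw [show layer - 1 + 1 = layer from by ring,
        show layer + (k : Int) - 1 + 1 = layer + (k : Int) from by ring]
    simp only [PySem.List.pyRange_one]
    rw [show (layer + (k : Int) + 1 - layer).toNat = k + 1 from by omega,
        show (layer + (k : Int) + 1 - (layer + 1)).toNat = k from by omega,
        show (layer + (k : Int) - layer).toNat = k from by omega,
        show (layer + (k : Int) - (layer + 1)).toNat = k - 1 from by omega]
    simp only [List.map_map, sum_map_range, Function.comp]
    -- identify the five sums with the shapes ring_sum speaks about
    have e1 : (∑ j ∈ Finset.range (k + 1),
        PySem.List.pyGetD mat (layer * n + (layer + (j : Int))) 0)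
        = ∑ c ∈ Finset.range (k + 1),
        PySem.List.pyGetD mat ((layer + ((0 : ℕ) : Int)) * n + (layer + (c : Int))) 0 := by
      refine Finset.sum_congr rfl (fun j _ => ?_)
      norm_num
    have e2 : (∑ j ∈ Finset.range k,
        PySem.List.pyGetD mat ((layer + 1 + (j : Int)) * n + (layer + (k : Int))) 0)
        = ∑ j ∈ Finset.range k,
        PySem.List.pyGetD mat ((layer + ((j + 1 : ℕ) : Int)) * n + (layer + (k : Int))) 0 := by
      refine Finset.sum_congr rfl (fun j _ => ?_)
      rw [show layer + 1 + (j : Int) = layer + ((j + 1 : ℕ) : Int) from by push_cast; ring]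
    have e4 : (∑ j ∈ Finset.range (k - 1),
        PySem.List.pyGetD mat ((layer + 1 + (j : Int)) * n + layer) 0)
        = ∑ j ∈ Finset.range (k - 1),
        PySem.List.pyGetD mat ((layer + ((j + 1 : ℕ) : Int)) * n + (layer + ((0 : ℕ) : Int))) 0 := by
      refine Finset.sum_congr rfl (fun j _ => ?_)
      rw [show layer + 1 + (j : Int) = layer + ((j + 1 : ℕ) : Int) from by push_cast; ring]
      norm_num
    -- bridge the border condition from Int to Nat indices
    have eB : (∑ r ∈ Finset.range (k + 1),
        ((∑ c ∈ Finset.range (k + 1),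
          if layer + (r : Int) = layer ∨ layer + (r : Int) = layer + (k : Int) ∨
             layer + (c : Int) = layer ∨ layer + (c : Int) = layer + (k : Int) then
            PySem.List.pyGetD mat ((layer + (r : Int)) * n + (layer + (c : Int))) 0 else 0)))
        = ∑ r ∈ Finset.range (k + 1), ∑ c ∈ Finset.range (k + 1),
          if r = 0 ∨ r = k ∨ c = 0 ∨ c = k then
            PySem.List.pyGetD mat ((layer + (r : Int)) * n + (layer + (c : Int))) 0 else 0 := by
      refine Finset.sum_congr rfl (fun r _ => Finset.sum_congr rfl (fun c _ => ?_))
      refine if_congr ?_ rfl rfl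
      constructor <;> intro h <;> omega
    rw [eB, ring_sum (fun r c =>
      PySem.List.pyGetD mat ((layer + (r : Int)) * n + (layer + (c : Int))) 0) k]
    rcases Nat.eq_zero_or_pos k with hk0 | hk0
    · subst hk0
      have hlt : ¬ (layer < layer + ((0 : ℕ) : Int)) := by omega
      simp only [hlt, if_false, lt_self_iff_false, Finset.range_zero, Finset.sum_empty]
      rw [e1]; ring
    · have hlt : layer < layer + (k : Int) := by omega
      simp only [hlt, hk0, if_true]
      rw [e1, e2, e4]
      ring

-- ===== VERDICT (by name: the statement is the Claim_ definition above) =====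
theorem spiral_layer_sum_spec : Claim_equal_spiral_layer_sum := by
  intro mat n layer _ _
  exact main_eq mat n layer
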